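-- pv_equiv track=rewrite | github.com/wongzc/NUS_IT5001_PE_answer | IT5001 2022_23 SEM2 PE.py | max_island_perimeter
-- ===== SOURCE A (Python) =====
-- def max_island_perimeter(mp):
--     m=len(mp)
--     n=len(mp[0])
--     mp=[[i for i in j] for j in mp]
--     def bfs(i,j):
--         curr=0
--         mp[i][j]='X'
--         if i<=0 or mp[i-1][j]==0:
--             curr+=1
--         elif mp[i-1][j]==1:
--             curr+=bfs(i-1,j)
--
--         if i>=m-1 or mp[i+1][j]==0:
--             curr+=1
--         elif mp[i+1][j]==1:
--             curr+=bfs(i+1,j)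
--
--         if j<=0 or mp[i][j-1]==0:
--             curr+=1
--         elif mp[i][j-1]==1:
--             curr+=bfs(i,j-1)
--
--         if j>=n-1 or mp[i][j+1]==0:
--             curr+=1
--         elif mp[i][j+1]==1:
--             curr+=bfs(i,j+1)
--         return curr
--     ans=0
--     for i in range(m):
--         for j in range(n):
--             if mp[i][j]==1:
--                 ans=max(ans,bfs(i,j))
--
--     return ans
-- ===== SOURCE B (Python) =====
-- def max_island_perimeter(mp):
--     m = len(mp)
--     n = len(mp[0])
--     g = [row[:] for row in mp]
--     best = 0
--     for si in range(m):
--         for sj in range(n):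
--             if g[si][sj] != 1:
--                 continue
--             total = 0
--             stack = [(si, sj)]
--             while stack:
--                 a, b = stack.pop()
--                 if g[a][b] != 1:
--                     continue
--                 g[a][b] = 'X'
--                 for da, db in ((0, 1), (0, -1), (1, 0), (-1, 0)):
--                     x, y = a + da, b + db
--                     if x < 0 or x >= m or y < 0 or y >= n or g[x][y] == 0:
--                         total += 1
--                     elif g[x][y] == 1:
--                         stack.append((x, y))
--             best = max(best, total)
--     return best
-- ===== Notes on version B (the rewrite author's own statement) =====
-- stated objective: alternative
-- what changed: The recursive nested DFS (function bfs mutating the shared copied grid) is replaced by an iterative flood fill: an explicit stack with a pop-time recheck, marking cells and counting water/boundary sides as each cell is popped.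
import Mathlib
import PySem

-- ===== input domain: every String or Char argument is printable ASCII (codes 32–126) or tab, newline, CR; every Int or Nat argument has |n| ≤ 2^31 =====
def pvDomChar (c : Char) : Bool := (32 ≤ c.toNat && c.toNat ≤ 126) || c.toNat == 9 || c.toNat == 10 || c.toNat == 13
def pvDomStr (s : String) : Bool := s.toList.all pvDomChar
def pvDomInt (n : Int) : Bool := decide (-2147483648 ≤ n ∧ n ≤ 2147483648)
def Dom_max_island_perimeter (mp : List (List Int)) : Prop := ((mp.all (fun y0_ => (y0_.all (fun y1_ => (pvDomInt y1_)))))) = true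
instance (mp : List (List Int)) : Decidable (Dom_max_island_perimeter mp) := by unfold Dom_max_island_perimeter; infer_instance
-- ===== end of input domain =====

-- B replaces A's recursive DFS by an iterative explicit-stack flood fill (alternative decomposition,
-- same cost); both work on a copy of the grid, so neither mutates the caller's argument.

-- Shared grid primitives (cell read, cell write, number of 1-cells; `ones` is also the fuel/termination
-- measure of the two traversals).  Python's mark 'X' is represented by the Int 2: both programs only
-- ever compare cells with 0 and 1, and 'X' is neither, so any value outside {0,1} is an exact model.
def at2 (g : List (List Int)) (i j : Nat) : Int := (g.getD i []).getD j 0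

def set2 (g : List (List Int)) (i j : Nat) (v : Int) : List (List Int) :=
  g.set i ((g.getD i []).set j v)

def ones (g : List (List Int)) : Nat :=
  (g.map (fun r => r.countP (fun x => x == 1))).sum

-- lemmas cited by floodLoop's termination proof (and reused by the equivalence proof below)
theorem countP_set_lt (r : List Int) (j : Nat) (hj : j < r.length)
    (h1 : r.getD j 0 = 1) :
    (r.set j 2).countP (fun x => x == 1) < r.countP (fun x => x == 1) := by
  induction r generalizing j with
  | nil => simp at hj
  | cons x xs ih =>
    cases j with
    | zero =>
      simp only [List.getD_cons_zero] at h1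
      subst h1
      simp
    | succ j =>
      simp only [List.set, List.countP_cons]
      have := ih j (by simpa using hj) (by simpa using h1)
      omega


theorem at2_one_lt (g : List (List Int)) (i j : Nat) (h : at2 g i j = 1) :
    i < g.length ∧ j < (g.getD i []).length := by
  constructor
  · by_contra hc
    rw [at2, List.getD_eq_default _ _ (Nat.le_of_not_lt hc)] at h
    simp at h
  · by_contra hc
    rw [at2, List.getD_eq_default _ _ (Nat.le_of_not_lt hc)] at h
    exact absurd h (by norm_num)

theorem sum_set_lt (l : List Nat) (i : Nat) (v : Nat) (hi : i < l.length)
    (hv : v < l.getD i 0) : (l.set i v).sum < l.sum := by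
  induction l generalizing i with
  | nil => simp at hi
  | cons x xs ih =>
    cases i with
    | zero => simp at hv ⊢; omega
    | succ i =>
      simp only [List.set, List.sum_cons]
      have := ih i (by simpa using hi) (by simpa using hv)
      omega

theorem map_getD_ones (g : List (List Int)) (i : Nat) (hi : i < g.length) :
    (g.map (fun r => r.countP (fun x => x == 1))).getD i 0
      = (g.getD i []).countP (fun x => x == 1) := by
  rw [List.getD_eq_getElem?_getD, List.getD_eq_getElem?_getD,
      List.getElem?_map, List.getElem?_eq_getElem hi]
  simp

theorem ones_set2_lt (g : List (List Int)) (i j : Nat) (h : at2 g i j = 1) :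
    ones (set2 g i j 2) < ones g := by
  obtain ⟨hi, hj⟩ := at2_one_lt g i j h
  unfold ones set2
  rw [List.map_set]
  exact sum_set_lt _ i _ (by simpa using hi)
    (by rw [map_getD_ones g i hi]; exact countP_set_lt _ j hj (by simpa [at2] using h))

-- ===== PORT A =====
-- A's recursive bfs with the mutated grid threaded through; `fuel` is a totality guard only:
-- every call site supplies fuel = ones of the grid, which is always sufficient (each call marks a 1-cell).
def bfsA (m n fuel : Nat) (g : List (List Int)) (i j : Nat) : Int × List (List Int) :=
  match fuel with
  | 0 => (0, g)
  | fuel + 1 =>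
    let g0 := set2 g i j 2
    let p1 := if i = 0 then ((1 : Int), g0)
              else if at2 g0 (i-1) j = 0 then (1, g0)
              else if at2 g0 (i-1) j = 1 then bfsA m n fuel g0 (i-1) j
              else (0, g0)
    let p2 := if i+1 ≥ m then ((1 : Int), p1.2)
              else if at2 p1.2 (i+1) j = 0 then (1, p1.2)
              else if at2 p1.2 (i+1) j = 1 then bfsA m n fuel p1.2 (i+1) j
              else (0, p1.2)
    let p3 := if j = 0 then ((1 : Int), p2.2)
              else if at2 p2.2 i (j-1) = 0 then (1, p2.2)
              else if at2 p2.2 i (j-1) = 1 then bfsA m n fuel p2.2 i (j-1)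
              else (0, p2.2)
    let p4 := if j+1 ≥ n then ((1 : Int), p3.2)
              else if at2 p3.2 i (j+1) = 0 then (1, p3.2)
              else if at2 p3.2 i (j+1) = 1 then bfsA m n fuel p3.2 i (j+1)
              else (0, p3.2)
    (p1.1 + p2.1 + p3.1 + p4.1, p4.2)

def cellA (m n : Nat) (st : Int × List (List Int)) (i j : Nat) : Int × List (List Int) :=
  if at2 st.2 i j = 1 then
    let r := bfsA m n (ones st.2) st.2 i j
    (max st.1 r.1, r.2)
  else st

def max_island_perimeter (mp : List (List Int)) : Int :=
  let m := mp.length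
  let n := (mp.headD []).length            -- len(mp[0]); Pre_ excludes the empty grid, where Python raises
  let g := mp.map (fun r => r.map (fun x => x))   -- the copied grid
  ((List.range m).foldl
    (fun st i => (List.range n).foldl (fun st j => cellA m n st i j) st)
    ((0 : Int), g)).1

-- ===== PORT B =====
-- Iterative flood fill: pop a cell, recheck that it is still 1, mark it, add +1 per off-grid/water side,
-- push the still-1 neighbours.  The Lean stack has its head as the top (Python appends R,L,D,U and pops
-- from the end, so the popped order U,D,L,R becomes the prepended list below).
def floodLoop (m n : Nat) (g : List (List Int)) (st : List (Nat × Nat)) (tot : Int) :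
    Int × List (List Int) :=
  match st with
  | [] => (tot, g)
  | (a, b) :: rest =>
    if h : at2 g a b = 1 then
      let g' := set2 g a b 2
      let cR := (a ≥ m ∨ b+1 ≥ n) ∨ at2 g' a (b+1) = 0
      let cL := (a ≥ m ∨ b = 0 ∨ b-1 ≥ n) ∨ at2 g' a (b-1) = 0
      let cD := (a+1 ≥ m ∨ b ≥ n) ∨ at2 g' (a+1) b = 0
      let cU := (a = 0 ∨ a-1 ≥ m ∨ b ≥ n) ∨ at2 g' (a-1) b = 0
      let add : Int := (if cR then 1 else 0) + (if cL then 1 else 0)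
                     + (if cD then 1 else 0) + (if cU then 1 else 0)
      let pushes := (if ¬cU ∧ at2 g' (a-1) b = 1 then [(a-1, b)] else [])
                 ++ (if ¬cD ∧ at2 g' (a+1) b = 1 then [(a+1, b)] else [])
                 ++ (if ¬cL ∧ at2 g' a (b-1) = 1 then [(a, b-1)] else [])
                 ++ (if ¬cR ∧ at2 g' a (b+1) = 1 then [(a, b+1)] else [])
      floodLoop m n g' (pushes ++ rest) (tot + add)
    else floodLoop m n g rest tot
termination_by (ones g, st.length)
decreasing_by
  · exact Prod.Lex.left _ _ (ones_set2_lt g a b h)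
  · exact Prod.Lex.right _ (Nat.lt_succ_self _)

def cellB (m n : Nat) (st : Int × List (List Int)) (i j : Nat) : Int × List (List Int) :=
  if at2 st.2 i j = 1 then
    let r := floodLoop m n st.2 [(i, j)] 0
    (max st.1 r.1, r.2)
  else st

def max_island_perimeter_alt (mp : List (List Int)) : Int :=
  let m := mp.length
  let n := (mp.headD []).length
  let g := mp.map (fun r => r.map (fun x => x))
  ((List.range m).foldl
    (fun st i => (List.range n).foldl (fun st j => cellB m n st i j) st)
    ((0 : Int), g)).1

-- ===== PRECONDITION & SPEC =====
-- Pre_ excludes exactly the inputs on which Python A raises IndexError: the empty grid (len(mp[0]))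
-- and grids with some row shorter than the first row (the full scan reads mp[i][j] for every j < len(mp[0])).
def Pre_max_island_perimeter (mp : List (List Int)) : Prop :=
  mp ≠ [] ∧ ∀ r ∈ mp, (mp.headD []).length ≤ r.length

instance (mp : List (List Int)) : Decidable (Pre_max_island_perimeter mp) := by
  unfold Pre_max_island_perimeter; infer_instance

def pvWitness_max_island_perimeter : List (List Int) := [[1, 0], [0, 1]]

def Spec_max_island_perimeter (mp : List (List Int)) (out : Int) : Prop :=
  out = max_island_perimeter_alt mp
instance (mp : List (List Int)) (out : Int) : Decidable (Spec_max_island_perimeter mp out) := by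
  unfold Spec_max_island_perimeter; infer_instance

-- ===== CLAIM (what is proved, stated in full; the proofs are below) =====
def Claim_equal_max_island_perimeter : Prop :=
  ∀ (mp : List (List Int)), Dom_max_island_perimeter mp → Pre_max_island_perimeter mp →
    Spec_max_island_perimeter mp (max_island_perimeter mp)

-- ===== LEMMAS AND PROOFS =====

-- well-formedness of the grid: m rows, every row of length ≥ n
def Dims (m n : Nat) (g : List (List Int)) : Prop :=
  g.length = m ∧ ∀ a, a < m → n ≤ (g.getD a []).length

-- the evolution relation between grid states: a cell keeps its value or goes 1 → 2 ('X')
def Step (g g' : List (List Int)) : Prop :=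
  ∀ a b, at2 g' a b = at2 g a b ∨ (at2 g a b = 1 ∧ at2 g' a b = 2)

theorem countP_set_le (r : List Int) (j : Nat) :
    (r.set j 2).countP (fun x => x == 1) ≤ r.countP (fun x => x == 1) := by
  induction r generalizing j with
  | nil => simp
  | cons x xs ih =>
    cases j with
    | zero => simp [List.countP_cons]
    | succ j => simp only [List.set, List.countP_cons]; have := ih j; omega

theorem getD_set {α : Type} (l : List α) (i j : Nat) (a : α) (d : α) :
    (l.set i a).getD j d = if i = j ∧ i < l.length then a else l.getD j d := by
  induction l generalizing i j with
  | nil => simp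
  | cons x xs ih =>
    cases i with
    | zero => cases j <;> simp
    | succ i =>
      cases j with
      | zero => simp
      | succ j => simpa using ih i j

theorem sum_set_le (l : List Nat) (i : Nat) (v : Nat)
    (hv : v ≤ l.getD i 0) : (l.set i v).sum ≤ l.sum := by
  induction l generalizing i with
  | nil => simp
  | cons x xs ih =>
    cases i with
    | zero => simp at hv ⊢; omega
    | succ i =>
      simp only [List.set, List.sum_cons]
      have := ih i (by simpa using hv)
      omega

theorem ones_set2_le (g : List (List Int)) (i j : Nat) :
    ones (set2 g i j 2) ≤ ones g := by
  unfold ones set2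
  rw [List.map_set]
  by_cases hi : i < g.length
  · exact sum_set_le _ i _ (by rw [map_getD_ones g i hi]; exact countP_set_le _ j)
  · rw [List.set_eq_of_length_le (by simpa using Nat.le_of_not_lt hi)]

theorem ones_pos (g : List (List Int)) (i j : Nat) (h : at2 g i j = 1) : 0 < ones g :=
  Nat.pos_of_ne_zero (fun hz => by have := ones_set2_lt g i j h; omega)

theorem getD_row_set2 (g : List (List Int)) (i j : Nat) (v : Int) (a : Nat) :
    (set2 g i j v).getD a [] =
      if i = a ∧ i < g.length then (g.getD i []).set j v else g.getD a [] := by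
  rw [set2, getD_set]

theorem at2_set2 (g : List (List Int)) (i j : Nat) (v : Int) (x y : Nat) :
    at2 (set2 g i j v) x y =
      if i = x ∧ j = y ∧ i < g.length ∧ j < (g.getD i []).length then v
      else at2 g x y := by
  rw [at2, getD_row_set2, at2]
  by_cases hix : i = x
  · subst hix
    by_cases hi : i < g.length
    · rw [if_pos ⟨rfl, hi⟩, getD_set]
      by_cases hjy : j = y
      · subst hjy
        by_cases hj : j < (g.getD i []).length
        · rw [if_pos ⟨rfl, hj⟩, if_pos ⟨rfl, rfl, hi, hj⟩]
        · rw [if_neg (by tauto), if_neg (by tauto)]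
      · rw [if_neg (by tauto), if_neg (by tauto)]
    · rw [if_neg (by tauto), if_neg (by tauto)]
  · rw [if_neg (by tauto), if_neg (by tauto)]

theorem Step.refl (g : List (List Int)) : Step g g := fun _ _ => Or.inl rfl

theorem Step.trans {g h k : List (List Int)} (h1 : Step g h) (h2 : Step h k) : Step g k := by
  intro a b
  rcases h2 a b with e2 | ⟨o2, t2⟩
  · rcases h1 a b with e1 | ⟨o1, t1⟩
    · exact Or.inl (e2.trans e1)
    · exact Or.inr ⟨o1, e2.trans t1⟩
  · rcases h1 a b with e1 | ⟨o1, t1⟩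
    · exact Or.inr ⟨e1 ▸ o2, t2⟩
    · exact Or.inr ⟨o1, t2⟩

theorem step_set2 {g : List (List Int)} {i j : Nat} (h : at2 g i j = 1) :
    Step g (set2 g i j 2) := by
  intro a b
  rw [at2_set2]
  split
  · next hc => exact Or.inr ⟨by rw [← hc.1, ← hc.2.1]; exact h, rfl⟩
  · exact Or.inl rfl

theorem Step.zero {g g' : List (List Int)} (h : Step g g') (a b : Nat) :
    at2 g a b = 0 ↔ at2 g' a b = 0 := by
  rcases h a b with e | ⟨o, t⟩
  · rw [e]
  · rw [o, t]; norm_num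

theorem Step.not_one {g g' : List (List Int)} (h : Step g g') {a b : Nat}
    (hn : at2 g a b ≠ 1) : at2 g' a b = at2 g a b := by
  rcases h a b with e | ⟨o, t⟩
  · exact e
  · exact absurd o hn

theorem Step.one_cases {g g' : List (List Int)} (h : Step g g') {a b : Nat}
    (ho : at2 g a b = 1) : at2 g' a b = 1 ∨ at2 g' a b = 2 := by
  rcases h a b with e | ⟨o, t⟩
  · exact Or.inl (e.trans ho)
  · exact Or.inr t

theorem dims_set2 {m n : Nat} {g : List (List Int)} (h : Dims m n g) (i j : Nat) (v : Int) :
    Dims m n (set2 g i j v) := by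
  refine ⟨by simp [set2, h.1], fun a ha => ?_⟩
  rw [getD_row_set2]
  split
  · next hc => rw [List.length_set]; exact h.2 i (hc.1 ▸ ha)
  · exact h.2 a ha

def Ad (m n t : Nat) (off : Prop) [Decidable off] (g : List (List Int)) (x y : Nat) :
    Int × List (List Int) :=
  if off then (1, g)
  else if at2 g x y = 0 then (1, g)
  else if at2 g x y = 1 then bfsA m n t g x y
  else (0, g)

def seq4 (m n t : Nat) (g : List (List Int)) (i j : Nat) : Int × List (List Int) :=
  let p1 := Ad m n t (i = 0) g (i-1) j
  let p2 := Ad m n t (i+1 ≥ m) p1.2 (i+1) j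
  let p3 := Ad m n t (j = 0) p2.2 i (j-1)
  let p4 := Ad m n t (j+1 ≥ n) p3.2 i (j+1)
  (p1.1 + p2.1 + p3.1 + p4.1, p4.2)

theorem bfsA_succ (m n t : Nat) (g : List (List Int)) (i j : Nat) :
    bfsA m n (t+1) g i j = seq4 m n t (set2 g i j 2) i j := rfl

theorem step_Ad_of (m n t : Nat) (off : Prop) [Decidable off] (g : List (List Int)) (x y : Nat)
    (ih : ∀ g' x' y', at2 g' x' y' = 1 → Step g' (bfsA m n t g' x' y').2) :
    Step g (Ad m n t off g x y).2 := by
  unfold Ad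
  split
  · exact Step.refl _
  split
  · exact Step.refl _
  split
  · next h => exact ih g x y h
  · exact Step.refl _

theorem seq4_step (m n t : Nat) (g : List (List Int)) (i j : Nat)
    (ih : ∀ g' x' y', at2 g' x' y' = 1 → Step g' (bfsA m n t g' x' y').2) :
    Step g (seq4 m n t g i j).2 := by
  unfold seq4
  exact ((((Step.refl g).trans (step_Ad_of m n t _ g _ j ih)).trans
    (step_Ad_of m n t _ _ _ j ih)).trans (step_Ad_of m n t _ _ i _ ih)).trans
    (step_Ad_of m n t _ _ i _ ih)

theorem stepA (m n : Nat) : ∀ (fuel : Nat) (g : List (List Int)) (i j : Nat),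
    at2 g i j = 1 → Step g (bfsA m n fuel g i j).2 := by
  intro fuel
  induction fuel with
  | zero => intro g i j _; exact Step.refl g
  | succ t ih =>
    intro g i j h1
    rw [bfsA_succ]
    exact (step_set2 h1).trans (seq4_step m n t _ i j ih)

theorem ones_Ad_le (m n t : Nat) (off : Prop) [Decidable off] (g : List (List Int)) (x y : Nat)
    (ih : ∀ g' x' y', ones (bfsA m n t g' x' y').2 ≤ ones g') :
    ones (Ad m n t off g x y).2 ≤ ones g := by
  unfold Ad
  split
  · exact le_rfl
  split
  · exact le_rfl
  split
  · exact ih g x y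
  · exact le_rfl

theorem seq4_ones (m n t : Nat) (g : List (List Int)) (i j : Nat)
    (ih : ∀ g' x' y', ones (bfsA m n t g' x' y').2 ≤ ones g') :
    ones (seq4 m n t g i j).2 ≤ ones g := by
  unfold seq4
  exact le_trans (ones_Ad_le m n t _ _ i _ ih)
    (le_trans (ones_Ad_le m n t _ _ i _ ih)
      (le_trans (ones_Ad_le m n t _ _ _ j ih) (ones_Ad_le m n t _ _ _ j ih)))

theorem onesA (m n : Nat) : ∀ (fuel : Nat) (g : List (List Int)) (i j : Nat),
    ones (bfsA m n fuel g i j).2 ≤ ones g := by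
  intro fuel
  induction fuel with
  | zero => intro g i j; exact le_rfl
  | succ t ih =>
    intro g i j
    rw [bfsA_succ]
    exact le_trans (seq4_ones m n t _ i j (fun g' x' y' => ih g' x' y')) (ones_set2_le g i j)

theorem dims_Ad (m n mm nn t : Nat) (off : Prop) [Decidable off] (g : List (List Int)) (x y : Nat)
    (hd : Dims mm nn g)
    (ih : ∀ g' x' y', Dims mm nn g' → Dims mm nn (bfsA m n t g' x' y').2) :
    Dims mm nn (Ad m n t off g x y).2 := by
  unfold Ad
  split
  · exact hd
  split
  · exact hd
  split
  · exact ih g x y hd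
  · exact hd

theorem dimsA (m n mm nn : Nat) : ∀ (fuel : Nat) (g : List (List Int)) (i j : Nat),
    Dims mm nn g → Dims mm nn (bfsA m n fuel g i j).2 := by
  intro fuel
  induction fuel with
  | zero => intro g i j hd; exact hd
  | succ t ih =>
    intro g i j hd
    rw [bfsA_succ]
    unfold seq4
    exact dims_Ad m n mm nn t _ _ i _ (dims_Ad m n mm nn t _ _ i _
      (dims_Ad m n mm nn t _ _ _ j (dims_Ad m n mm nn t _ _ _ j
        (dims_set2 hd i j 2) ih) ih) ih) ih

theorem mono_Ad (m n t t' : Nat) (K : Nat) (off : Prop) [Decidable off]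
    (g : List (List Int)) (x y : Nat)
    (hK : ones g ≤ K) (ht : ones g ≤ t) (ht' : ones g ≤ t')
    (ih : ∀ f f' g' x' y', ones g' ≤ K → at2 g' x' y' = 1 → ones g' ≤ f → ones g' ≤ f' →
          bfsA m n f g' x' y' = bfsA m n f' g' x' y') :
    Ad m n t off g x y = Ad m n t' off g x y := by
  unfold Ad
  split
  · rfl
  split
  · rfl
  split
  · next h => exact ih t t' g x y hK h ht ht'
  · rfl

theorem monoA (m n : Nat) : ∀ (K : Nat) (f f' : Nat) (g : List (List Int)) (i j : Nat),
    ones g ≤ K → at2 g i j = 1 → ones g ≤ f → ones g ≤ f' →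
    bfsA m n f g i j = bfsA m n f' g i j := by
  intro K
  induction K with
  | zero => intro f f' g i j hK h1 _ _; exact absurd (ones_pos g i j h1) (by omega)
  | succ K ih =>
    intro f f' g i j hK h1 hf hf'
    have hp := ones_pos g i j h1
    obtain ⟨t, rfl⟩ : ∃ t, f = t + 1 := ⟨f - 1, by omega⟩
    obtain ⟨t', rfl⟩ : ∃ t', f' = t' + 1 := ⟨f' - 1, by omega⟩
    rw [bfsA_succ, bfsA_succ]
    have hlt := ones_set2_lt g i j h1
    unfold seq4
    dsimp only
    have honesA := onesA m n t
    have hones0 : ones (set2 g i j 2) ≤ K := by omega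
    set g0 := set2 g i j 2 with hg0
    have e1 : Ad m n t (i = 0) g0 (i-1) j = Ad m n t' (i = 0) g0 (i-1) j :=
      mono_Ad m n t t' K _ _ _ j hones0 (by omega) (by omega) ih
    rw [e1]
    set p1 := Ad m n t' (i = 0) g0 (i-1) j with hp1
    have ho1 : ones p1.2 ≤ ones g0 := ones_Ad_le m n t' _ _ _ _ (onesA m n t')
    have e2 : Ad m n t (i+1 ≥ m) p1.2 (i+1) j = Ad m n t' (i+1 ≥ m) p1.2 (i+1) j :=
      mono_Ad m n t t' K _ _ _ j (by omega) (by omega) (by omega) ih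
    rw [e2]
    set p2 := Ad m n t' (i+1 ≥ m) p1.2 (i+1) j with hp2
    have ho2 : ones p2.2 ≤ ones p1.2 := ones_Ad_le m n t' _ _ _ _ (onesA m n t')
    have e3 : Ad m n t (j = 0) p2.2 i (j-1) = Ad m n t' (j = 0) p2.2 i (j-1) :=
      mono_Ad m n t t' K _ _ i _ (by omega) (by omega) (by omega) ih
    rw [e3]
    set p3 := Ad m n t' (j = 0) p2.2 i (j-1) with hp3
    have ho3 : ones p3.2 ≤ ones p2.2 := ones_Ad_le m n t' _ _ _ _ (onesA m n t')
    have e4 : Ad m n t (j+1 ≥ n) p3.2 i (j+1) = Ad m n t' (j+1 ≥ n) p3.2 i (j+1) :=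
      mono_Ad m n t t' K _ _ i _ (by omega) (by omega) (by omega) ih
    rw [e4]

def bfsApp (m n : Nat) (g : List (List Int)) (a b : Nat) : Int × List (List Int) :=
  if at2 g a b = 1 then bfsA m n (ones g) g a b else (0, g)

theorem flood_cons_not1 (m n : Nat) (g : List (List Int)) (a b : Nat)
    (rest : List (Nat × Nat)) (tot : Int) (h : at2 g a b ≠ 1) :
    floodLoop m n g ((a,b)::rest) tot = floodLoop m n g rest tot := by
  rw [floodLoop, dif_neg h]

theorem dir_step (m n t K : Nat) (g' cur : List (List Int)) (x y : Nat)
    (offA offB : Prop) [Decidable offA] [Decidable offB] (hOff : offA ↔ offB)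
    (rest : List (Nat × Nat)) (τ : Int)
    (hstep : Step g' cur) (ht : ones cur ≤ t) (hK : ones cur ≤ K)
    (hdims : Dims m n cur) (hxy : ¬ offA → x < m ∧ y < n)
    (IH : ∀ g a b st tot, ones g ≤ K → a < m → b < n → Dims m n g →
       floodLoop m n g ((a,b)::st) tot
         = floodLoop m n (bfsApp m n g a b).2 st (tot + (bfsApp m n g a b).1)) :
    floodLoop m n cur
        ((if ¬(offB ∨ at2 g' x y = 0) ∧ at2 g' x y = 1 then [(x,y)] else []) ++ rest) τ
      = floodLoop m n (Ad m n t offA cur x y).2 rest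
          (τ + (Ad m n t offA cur x y).1 - (if offB ∨ at2 g' x y = 0 then (1:Int) else 0)) := by
  by_cases ho : offA
  · have hC : offB ∨ at2 g' x y = 0 := Or.inl (hOff.mp ho)
    have hP : ¬(¬(offB ∨ at2 g' x y = 0) ∧ at2 g' x y = 1) := by tauto
    rw [if_neg hP, if_pos hC]
    have hAd : Ad m n t offA cur x y = (1, cur) := by rw [Ad, if_pos ho]
    rw [hAd]
    norm_num
  · have hoB : ¬ offB := fun h => ho (hOff.mpr h)
    by_cases h0 : at2 g' x y = 0
    · have hc0 : at2 cur x y = 0 := (hstep.zero x y).mp h0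
      have hC : offB ∨ at2 g' x y = 0 := Or.inr h0
      have hP : ¬(¬(offB ∨ at2 g' x y = 0) ∧ at2 g' x y = 1) := by tauto
      rw [if_neg hP, if_pos hC]
      have hAd : Ad m n t offA cur x y = (1, cur) := by
        rw [Ad, if_neg ho, if_pos hc0]
      rw [hAd]
      norm_num
    · have hC : ¬(offB ∨ at2 g' x y = 0) := by tauto
      by_cases h1 : at2 g' x y = 1
      · have hP : (¬(offB ∨ at2 g' x y = 0) ∧ at2 g' x y = 1) := ⟨hC, h1⟩
        rw [if_pos hP, if_neg hC]
        rcases hstep.one_cases h1 with hc1 | hc2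
        · have hAd : Ad m n t offA cur x y = bfsA m n t cur x y := by
            rw [Ad, if_neg ho, if_neg (by rw [hc1]; norm_num), if_pos hc1]
          have hIH := IH cur x y rest τ hK (hxy ho).1 (hxy ho).2 hdims
          rw [hAd, List.singleton_append, hIH]
          unfold bfsApp
          rw [if_pos hc1, monoA m n K (ones cur) t cur x y hK hc1 le_rfl ht]
          norm_num
        · have hAd : Ad m n t offA cur x y = (0, cur) := by
            rw [Ad, if_neg ho, if_neg (by rw [hc2]; norm_num), if_neg (by rw [hc2]; norm_num)]
          rw [hAd, List.singleton_append,
              flood_cons_not1 m n cur x y rest τ (by rw [hc2]; norm_num)]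
          norm_num
      · have hP : ¬(¬(offB ∨ at2 g' x y = 0) ∧ at2 g' x y = 1) := by tauto
        have hcur : at2 cur x y = at2 g' x y := hstep.not_one h1
        have hAd : Ad m n t offA cur x y = (0, cur) := by
          rw [Ad, if_neg ho, if_neg (fun hc => h0 (hcur ▸ hc)), if_neg (fun hc => h1 (hcur ▸ hc))]
        rw [if_neg hP, if_neg hC, hAd]
        norm_num

theorem L1 (m n : Nat) : ∀ (K : Nat) (g : List (List Int)) (a b : Nat)
    (st : List (Nat × Nat)) (tot : Int),
    ones g ≤ K → a < m → b < n → Dims m n g →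
    floodLoop m n g ((a,b)::st) tot
      = floodLoop m n (bfsApp m n g a b).2 st (tot + (bfsApp m n g a b).1) := by
  intro K
  induction K with
  | zero =>
    intro g a b st tot hK ha hb hd
    have hab : at2 g a b ≠ 1 := fun h => absurd (ones_pos g a b h) (by omega)
    rw [flood_cons_not1 m n g a b st tot hab]
    simp [bfsApp, hab]
  | succ K ih =>
    intro g a b st tot hK ha hb hd
    by_cases hab : at2 g a b = 1
    · have hpos := ones_pos g a b hab
      obtain ⟨t, hT⟩ : ∃ t, ones g = t + 1 := ⟨ones g - 1, by omega⟩
      rw [floodLoop, dif_pos hab]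
      dsimp only
      rw [bfsApp, if_pos hab, hT, bfsA_succ]
      unfold seq4
      dsimp only
      rw [List.append_assoc, List.append_assoc, List.append_assoc]
      have hlt : ones (set2 g a b 2) < ones g := ones_set2_lt g a b hab
      set g' := set2 g a b 2 with hg'
      have hd' : Dims m n g' := dims_set2 hd a b 2
      rw [dir_step m n t K g' g' (a-1) b (a = 0) (a = 0 ∨ a-1 ≥ m ∨ b ≥ n)
          (by omega) _ _ (Step.refl g') (by omega) (by omega) hd' (by omega) ih]
      set p1 := Ad m n t (a = 0) g' (a-1) b with hp1
      have hs1 : Step g' p1.2 := by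
        rw [hp1]; exact step_Ad_of m n t _ g' _ b (fun g0 x0 y0 h => stepA m n t g0 x0 y0 h)
      have ho1 : ones p1.2 ≤ ones g' := by
        rw [hp1]; exact ones_Ad_le m n t _ g' _ b (fun g0 x0 y0 => onesA m n t g0 x0 y0)
      have hd1 : Dims m n p1.2 := by
        rw [hp1]
        exact dims_Ad m n m n t _ g' _ b hd' (fun g0 x0 y0 h => dimsA m n m n t g0 x0 y0 h)
      rw [dir_step m n t K g' p1.2 (a+1) b (a+1 ≥ m) (a+1 ≥ m ∨ b ≥ n)
          (by omega) _ _ hs1 (by omega) (by omega) hd1 (by omega) ih]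
      set p2 := Ad m n t (a+1 ≥ m) p1.2 (a+1) b with hp2
      have hs2 : Step g' p2.2 := by
        rw [hp2]
        exact hs1.trans (step_Ad_of m n t _ p1.2 _ b (fun g0 x0 y0 h => stepA m n t g0 x0 y0 h))
      have ho2 : ones p2.2 ≤ ones p1.2 := by
        rw [hp2]; exact ones_Ad_le m n t _ p1.2 _ b (fun g0 x0 y0 => onesA m n t g0 x0 y0)
      have hd2 : Dims m n p2.2 := by
        rw [hp2]
        exact dims_Ad m n m n t _ p1.2 _ b hd1 (fun g0 x0 y0 h => dimsA m n m n t g0 x0 y0 h)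
      rw [dir_step m n t K g' p2.2 a (b-1) (b = 0) (a ≥ m ∨ b = 0 ∨ b-1 ≥ n)
          (by omega) _ _ hs2 (by omega) (by omega) hd2 (by omega) ih]
      set p3 := Ad m n t (b = 0) p2.2 a (b-1) with hp3
      have hs3 : Step g' p3.2 := by
        rw [hp3]
        exact hs2.trans (step_Ad_of m n t _ p2.2 a _ (fun g0 x0 y0 h => stepA m n t g0 x0 y0 h))
      have ho3 : ones p3.2 ≤ ones p2.2 := by
        rw [hp3]; exact ones_Ad_le m n t _ p2.2 a _ (fun g0 x0 y0 => onesA m n t g0 x0 y0)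
      have hd3 : Dims m n p3.2 := by
        rw [hp3]
        exact dims_Ad m n m n t _ p2.2 a _ hd2 (fun g0 x0 y0 h => dimsA m n m n t g0 x0 y0 h)
      rw [dir_step m n t K g' p3.2 a (b+1) (b+1 ≥ n) (a ≥ m ∨ b+1 ≥ n)
          (by omega) _ _ hs3 (by omega) (by omega) hd3 (by omega) ih]
      congr 1
      ring
    · rw [flood_cons_not1 m n g a b st tot hab]
      simp [bfsApp, hab]

theorem flood_nil (m n : Nat) (g : List (List Int)) (tot : Int) :
    floodLoop m n g [] tot = (tot, g) := by rw [floodLoop]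

theorem cell_eq (m n : Nat) (st : Int × List (List Int)) (i j : Nat)
    (hi : i < m) (hj : j < n) (hd : Dims m n st.2) :
    cellA m n st i j = cellB m n st i j := by
  unfold cellA cellB
  by_cases h : at2 st.2 i j = 1
  · rw [if_pos h, if_pos h]
    have := L1 m n (ones st.2) st.2 i j [] 0 le_rfl hi hj hd
    rw [this, flood_nil]
    unfold bfsApp
    rw [if_pos h]
    dsimp only
    norm_num
  · rw [if_neg h, if_neg h]

theorem cell_dims (m n : Nat) (st : Int × List (List Int)) (i j : Nat)
    (hd : Dims m n st.2) : Dims m n (cellA m n st i j).2 := by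
  unfold cellA
  split
  · exact dimsA m n m n (ones st.2) st.2 i j hd
  · exact hd

theorem inner_eq (m n : Nat) (i : Nat) (hi : i < m) :
    ∀ (js : List Nat) (st : Int × List (List Int)),
    (∀ j ∈ js, j < n) → Dims m n st.2 →
    js.foldl (fun s j => cellA m n s i j) st = js.foldl (fun s j => cellB m n s i j) st
    ∧ Dims m n (js.foldl (fun s j => cellA m n s i j) st).2 := by
  intro js
  induction js with
  | nil => intro st _ hd; exact ⟨rfl, hd⟩
  | cons j js ihj =>
    intro st hjs hd
    have hj : j < n := hjs j (List.mem_cons_self ..)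
    have hce := cell_eq m n st i j hi hj hd
    have hcd := cell_dims m n st i j hd
    simp only [List.foldl_cons]
    rw [← hce]
    exact ihj (cellA m n st i j) (fun x hx => hjs x (List.mem_cons_of_mem _ hx)) hcd

theorem outer_eq (m n : Nat) :
    ∀ (is : List Nat) (st : Int × List (List Int)),
    (∀ i ∈ is, i < m) → Dims m n st.2 →
    is.foldl (fun s i => (List.range n).foldl (fun s j => cellA m n s i j) s) st
      = is.foldl (fun s i => (List.range n).foldl (fun s j => cellB m n s i j) s) st := by
  intro is
  induction is with
  | nil => intro st _ _; rfl
  | cons i is ihi =>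
    intro st his hd
    have hi : i < m := his i (List.mem_cons_self ..)
    have h := inner_eq m n i hi (List.range n) st (fun j hj => List.mem_range.mp hj) hd
    simp only [List.foldl_cons]
    rw [← h.1]
    exact ihi _ (fun x hx => his x (List.mem_cons_of_mem _ hx)) h.2

-- ===== VERDICT (by name: the statement is the Claim_ definition above) =====
theorem max_island_perimeter_spec : Claim_equal_max_island_perimeter := by
  intro mp _ hpre
  unfold Spec_max_island_perimeter max_island_perimeter max_island_perimeter_alt
  dsimp only
  have hcopy : mp.map (fun r => r.map (fun x => x)) = mp := by simp
  rw [hcopy]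
  have hd : Dims mp.length (mp.headD []).length mp := by
    refine ⟨rfl, fun a ha => ?_⟩
    have hmem : mp.getD a [] ∈ mp := by
      rw [List.getD_eq_getElem mp [] ha]
      exact List.getElem_mem ha
    exact hpre.2 _ hmem
  rw [outer_eq mp.length (mp.headD []).length (List.range mp.length) ((0 : Int), mp)
      (fun i hi => List.mem_range.mp hi) hd]
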